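-- pv_equiv track=rewrite | github.com/vvalotto/SenialSOLIDApp | aplicacion/validation/framework/sanitization_engine.py | sanitize_json_output
-- ===== SOURCE A (Python) =====
-- def sanitize_json_output(json_data: str) -> str:
--     """
--     Sanitize JSON output to prevent JSON injection
--     """
--     if not json_data:
--         return json_data
--
--     # Escape potential XSS in JSON strings
--     # This is important when JSON is embedded in HTML
--     dangerous_chars = {
--         '<': '\\u003c',
--         '>': '\\u003e',
--         '&': '\\u0026',
--         "'": '\\u0027',
--         '"': '\\"'
--     }
--
--     sanitized = json_data
--     for char, replacement in dangerous_chars.items():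
--         if char in sanitized:
--             sanitized = sanitized.replace(char, replacement)
--
--     return sanitized
-- ===== SOURCE B (Python) =====
-- def sanitize_json_output(json_data: str) -> str:
--     """
--     Sanitize JSON output to prevent JSON injection
--     """
--     if not json_data:
--         return json_data
--
--     mapping = {
--         '<': '\\u003c',
--         '>': '\\u003e',
--         '&': '\\u0026',
--         "'": '\\u0027',
--         '"': '\\"'
--     }
--
--     return ''.join(mapping.get(c, c) for c in json_data)
-- ===== Notes on version B (the rewrite author's own statement) =====
-- stated objective: idiomatic
-- what changed: Replaces five sequential whole-string replace passes (each preceded by a membership scan) with a single character-level scan that maps each character through one escape table and joins the result.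
import Mathlib
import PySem

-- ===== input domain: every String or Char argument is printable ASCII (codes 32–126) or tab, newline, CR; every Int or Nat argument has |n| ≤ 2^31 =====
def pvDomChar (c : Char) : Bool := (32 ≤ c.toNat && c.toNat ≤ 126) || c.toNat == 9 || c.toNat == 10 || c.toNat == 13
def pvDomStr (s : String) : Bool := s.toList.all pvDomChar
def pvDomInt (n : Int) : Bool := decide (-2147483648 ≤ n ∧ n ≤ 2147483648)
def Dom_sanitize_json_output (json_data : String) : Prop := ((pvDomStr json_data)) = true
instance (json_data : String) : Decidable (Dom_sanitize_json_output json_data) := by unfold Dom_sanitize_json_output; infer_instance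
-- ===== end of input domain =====

-- B replaces A's five sequential whole-string replace passes by a single character-level scan
-- through one escape table (idiomatic one-pass rewrite); same return value on every input.

-- ===== PORT A =====
-- the dict 'dangerous_chars', as an association list in insertion order
def pvDangerousChars : List (String × String) :=
  [("<", "\\u003c"), (">", "\\u003e"), ("&", "\\u0026"), ("'", "\\u0027"), ("\"", "\\\"")]

def sanitize_json_output (json_data : String) : String :=
  if PySem.Str.len json_data == 0 then json_data
  else
    pvDangerousChars.foldl
      (fun sanitized cr =>
        if PySem.Str.isIn cr.1 sanitized then PySem.Str.replace sanitized cr.1 cr.2 else sanitized)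
      json_data

-- ===== PORT B =====
-- the dict 'mapping' of Source B, keyed by characters
def pvEscMap : PySem.Dict Char String :=
  ⟨[('<', "\\u003c"), ('>', "\\u003e"), ('&', "\\u0026"), ('\'', "\\u0027"), ('"', "\\\"")]⟩

-- ''.join(mapping.get(c, c) for c in json_data)
def sanitize_json_output_alt (json_data : String) : String :=
  if PySem.Str.len json_data == 0 then json_data
  else
    PySem.Str.join "" (json_data.toList.map (fun c => PySem.Dict.getD pvEscMap c (String.ofList [c])))

-- ===== PRECONDITION & SPEC =====
def Spec_sanitize_json_output (json_data : String) (out : String) : Prop := out = sanitize_json_output_alt json_data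
instance (json_data : String) (out : String) : Decidable (Spec_sanitize_json_output json_data out) := by unfold Spec_sanitize_json_output; infer_instance

-- ===== CLAIM (what is proved, stated in full; the proofs are below) =====
def Claim_equal_sanitize_json_output : Prop := ∀ (json_data : String), Dom_sanitize_json_output json_data → Spec_sanitize_json_output json_data (sanitize_json_output json_data)

-- ===== LEMMAS AND PROOFS =====

-- the worker of PySem.Chars.replace, for a single-character pattern, is a per-character flatMap
theorem pv_go_single (c : Char) (rep : List Char) :
    ∀ fuel l acc, l.length ≤ fuel →
      PySem.Chars.replace.go [c] rep fuel l acc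
        = acc.reverse ++ l.flatMap (fun x => if x = c then rep else [x]) := by
  intro fuel
  induction fuel with
  | zero =>
    intro l acc h
    cases l with
    | nil => simp [PySem.Chars.replace.go]
    | cons x t => simp at h
  | succ n ih =>
    intro l acc h
    cases l with
    | nil => simp [PySem.Chars.replace.go]
    | cons x t =>
      by_cases hx : x = c
      · subst hx
        simp [PySem.Chars.replace.go, List.isPrefixOf, ih t _ (by simpa using h)]
      · simp [PySem.Chars.replace.go, List.isPrefixOf, hx,
          show (c == x) = false from beq_eq_false_iff_ne.mpr (Ne.symm hx),
          ih t _ (by simpa using h)]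

theorem pv_replace_single (s : List Char) (c : Char) (rep : List Char) :
    PySem.Chars.replace s [c] rep = s.flatMap (fun x => if x = c then rep else [x]) := by
  simpa [PySem.Chars.replace] using pv_go_single c rep s.length s [] le_rfl

-- one step of A's loop ('if char in sanitized: sanitized = sanitized.replace(...)'), on Strings,
-- is a per-character flatMap whether or not the character occurs
theorem pv_stepS (s pat rep : String) (c : Char) (hp : pat.toList = [c]) :
    (if PySem.Str.isIn pat s then PySem.Str.replace s pat rep else s)
      = String.ofList (s.toList.flatMap (fun x => if x = c then rep.toList else [x])) := by
  split_ifs with h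
  · apply String.toList_inj.mp
    simp [PySem.Str.toList_replace, hp, pv_replace_single]
  · have hni : c ∉ s.toList := by
      intro hm
      exact absurd ((List.singleton_infix_iff c s.toList).mpr hm)
        (by rw [PySem.Str.isIn_iff_infix, hp] at h; exact h)
    apply String.toList_inj.mp
    simp only [String.toList_ofList]
    rw [List.flatMap_congr (g := fun x => [x]) (fun x hx => by
      simp [show x ≠ c from fun heq => hni (heq ▸ hx)])]
    simp

-- Chars.join with empty separator is flatten
theorem pv_join_nil (xs : List (List Char)) : PySem.Chars.join [] xs = xs.flatten := by
  simp only [PySem.Chars.join, List.intercalate]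
  induction xs with
  | nil => rfl
  | cons a t ih => cases t <;> simp_all [List.intersperse]

-- A's five stacked per-character flatMaps agree pointwise with B's single escape table
theorem pv_point (x : Char) :
    List.flatMap
        (fun x =>
          List.flatMap
            (fun x =>
              List.flatMap
                (fun x =>
                  List.flatMap (fun x => if x = '"' then ("\\\"" : String).toList else [x])
                    (if x = '\'' then ("\\u0027" : String).toList else [x]))
                (if x = '&' then ("\\u0026" : String).toList else [x]))
            (if x = '>' then ("\\u003e" : String).toList else [x]))
        (if x = '<' then ("\\u003c" : String).toList else [x])
      = (PySem.Dict.getD pvEscMap x (String.ofList [x])).toList := by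
  by_cases h1 : x = '<'
  · subst h1; decide
  by_cases h2 : x = '>'
  · subst h2; decide
  by_cases h3 : x = '&'
  · subst h3; decide
  by_cases h4 : x = '\''
  · subst h4; decide
  by_cases h5 : x = '"'
  · subst h5; decide
  · simp [h1, h2, h3, h4, h5, pvEscMap, PySem.Dict.getD, PySem.Dict.get?,
      beq_eq_false_iff_ne.mpr (Ne.symm h1), beq_eq_false_iff_ne.mpr (Ne.symm h2),
      beq_eq_false_iff_ne.mpr (Ne.symm h3), beq_eq_false_iff_ne.mpr (Ne.symm h4),
      beq_eq_false_iff_ne.mpr (Ne.symm h5)]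

-- ===== VERDICT (by name: the statement is the Claim_ definition above) =====
theorem sanitize_json_output_spec : Claim_equal_sanitize_json_output := by
  intro s _
  unfold Spec_sanitize_json_output sanitize_json_output sanitize_json_output_alt
  by_cases he : PySem.Str.len s == 0
  · rw [if_pos he, if_pos he]
  · rw [if_neg he, if_neg he]
    simp only [pvDangerousChars, List.foldl]
    rw [pv_stepS (pat := "<") (c := '<') _ _ rfl, pv_stepS (pat := ">") (c := '>') _ _ rfl,
        pv_stepS (pat := "&") (c := '&') _ _ rfl, pv_stepS (pat := "'") (c := '\'') _ _ rfl,
        pv_stepS (pat := "\"") (c := '"') _ _ rfl]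
    apply String.toList_inj.mp
    simp only [String.toList_ofList, PySem.Str.toList_join, List.map_map, List.flatMap_assoc]
    rw [show ("" : String).toList = [] from rfl, pv_join_nil, ← List.flatMap_def]
    simp only [Function.comp_def]
    exact List.flatMap_congr (fun x _ => pv_point x)
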